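-- pv_equiv track=rewrite | github.com/ognjhunt/BlueprintPipeline | scripts/runpod_sage/data_generation_mobile_franka.py | _find_phase_boundaries
-- ===== SOURCE A (Python) =====
-- def _find_phase_boundaries(labels):
--     """Find start/end indices for each phase."""
--     boundaries = []
--     if not labels:
--         return boundaries
--
--     current_phase = labels[0]
--     start = 0
--     for i, label in enumerate(labels):
--         if label != current_phase:
--             boundaries.append({
--                 "phase": current_phase,
--                 "start": start,
--                 "end": i - 1,
--             })
--             current_phase = label
--             start = i
--     boundaries.append({
--         "phase": current_phase,
--         "start": start,
--         "end": len(labels) - 1,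
--     })
--     return boundaries
-- ===== SOURCE B (Python) =====
-- def _find_phase_boundaries(labels):
--     """Find start/end indices for each phase (run-scanning rewrite)."""
--     boundaries = []
--     idx = 0
--     n_total = len(labels)
--     while idx < n_total:
--         phase = labels[idx]
--         j = idx
--         while j < n_total and labels[j] == phase:
--             j += 1
--         boundaries.append({"phase": phase, "start": idx, "end": j - 1})
--         idx = j
--     return boundaries
-- ===== Notes on version B (the rewrite author's own statement) =====
-- stated objective: alternative
-- what changed: Replaced the sentinel-based single pass (current_phase/start with transition detection and a trailing final append) by a run-scanning loop that finds each maximal run of equal labels with an inner scan and emits its boundary directly, with no special-cased final run.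
import Mathlib
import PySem

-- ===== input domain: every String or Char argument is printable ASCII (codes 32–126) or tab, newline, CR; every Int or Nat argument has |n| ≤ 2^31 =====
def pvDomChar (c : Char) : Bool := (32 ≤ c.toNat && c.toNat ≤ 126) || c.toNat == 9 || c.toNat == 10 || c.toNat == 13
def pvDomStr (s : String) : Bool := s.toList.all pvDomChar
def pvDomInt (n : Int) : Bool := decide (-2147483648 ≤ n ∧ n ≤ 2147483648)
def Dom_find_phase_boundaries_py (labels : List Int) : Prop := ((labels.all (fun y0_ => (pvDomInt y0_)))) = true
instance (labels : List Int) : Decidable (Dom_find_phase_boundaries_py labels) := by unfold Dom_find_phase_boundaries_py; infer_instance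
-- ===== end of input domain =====

-- B is a run-scanning rewrite of A's sentinel/transition pass: same values, different decomposition.

-- ===== PORT A =====
-- The Python for-loop over enumerate(labels) with state (boundaries, current_phase, start);
-- n is len(labels), used only in the final append (end = len(labels) - 1).
def aLoop (n : Int) : List Int → Int → Int → Int → List (List (String × Int)) → List (List (String × Int))
  | [], _, cur, start, bds =>
      bds ++ [[("phase", cur), ("start", start), ("end", n - 1)]]
  | l :: rest, i, cur, start, bds =>
      if l ≠ cur then
        aLoop n rest (i + 1) l i (bds ++ [[("phase", cur), ("start", start), ("end", i - 1)]])
      else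
        aLoop n rest (i + 1) cur start bds

def find_phase_boundaries_py (labels : List Int) : List (List (String × Int)) :=
  match labels with
  | [] => []
  | l0 :: _ => aLoop (labels.length : Int) labels 0 l0 0 []

-- ===== PORT B =====
-- Source B's outer while: take the maximal run of the leading label, emit its boundary, continue
-- past it.  The inner while (j scanning the run) is takeWhile/dropWhile on the same equality.
def find_phase_boundaries_py_alt_go (xs : List Int) (idx : Int) : List (List (String × Int)) :=
  match xs with
  | [] => []
  | x :: rest =>
      let n : Int := 1 + ((rest.takeWhile (· == x)).length : Int)
      [("phase", x), ("start", idx), ("end", idx + n - 1)] ::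
        find_phase_boundaries_py_alt_go (rest.dropWhile (· == x)) (idx + n)
  termination_by xs.length
  decreasing_by
    simp only [List.length_cons]
    exact Nat.lt_succ_of_le (List.length_dropWhile_le _ _)

def find_phase_boundaries_py_alt (labels : List Int) : List (List (String × Int)) :=
  find_phase_boundaries_py_alt_go labels 0

-- ===== PRECONDITION & SPEC =====
def Spec_find_phase_boundaries_py (labels : List Int) (out : List (List (String × Int))) : Prop := out = find_phase_boundaries_py_alt labels
instance (labels : List Int) (out : List (List (String × Int))) : Decidable (Spec_find_phase_boundaries_py labels out) := by unfold Spec_find_phase_boundaries_py; infer_instance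

-- ===== CLAIM (what is proved, stated in full; the proofs are below) =====
def Claim_equal_find_phase_boundaries_py : Prop := ∀ (labels : List Int), Dom_find_phase_boundaries_py labels → Spec_find_phase_boundaries_py labels (find_phase_boundaries_py labels)

-- ===== LEMMAS AND PROOFS =====

theorem altgo_nil (idx : Int) : find_phase_boundaries_py_alt_go [] idx = [] := by
  unfold find_phase_boundaries_py_alt_go
  rfl

theorem altgo_cons (x : Int) (rest : List Int) (idx : Int) :
    find_phase_boundaries_py_alt_go (x :: rest) idx =
      [("phase", x), ("start", idx),
       ("end", idx + (1 + ((rest.takeWhile (· == x)).length : Int)) - 1)] ::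
        find_phase_boundaries_py_alt_go (rest.dropWhile (· == x))
          (idx + (1 + ((rest.takeWhile (· == x)).length : Int))) := by
  rw [find_phase_boundaries_py_alt_go]

theorem key (n : Int) (xs : List Int) : ∀ (cur start i : Int) (bds : List (List (String × Int))),
    i + (xs.length : Int) = n →
    aLoop n xs i cur start bds =
      bds ++ ([("phase", cur), ("start", start),
               ("end", i + ((xs.takeWhile (· == cur)).length : Int) - 1)] ::
        find_phase_boundaries_py_alt_go (xs.dropWhile (· == cur))
          (i + ((xs.takeWhile (· == cur)).length : Int))) := by
  induction xs with
  | nil =>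
      intro cur start i bds h
      have hin : i = n := by simpa using h
      subst hin
      simp [aLoop, altgo_nil]
  | cons y t ih =>
      intro cur start i bds h
      have hlen : (i + 1) + (t.length : Int) = n := by
        simp only [List.length_cons] at h; push_cast at h ⊢; omega
      by_cases hy : y = cur
      · subst hy
        have hstep : aLoop n (y :: t) i y start bds = aLoop n t (i + 1) y start bds := by
          simp [aLoop]
        rw [hstep, ih y start (i + 1) bds hlen]
        have htw : (y :: t).takeWhile (· == y) = y :: t.takeWhile (· == y) := by
          simp [List.takeWhile]
        have hdw : (y :: t).dropWhile (· == y) = t.dropWhile (· == y) := by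
          simp [List.dropWhile]
        rw [htw, hdw]
        have e : i + ((y :: t.takeWhile (· == y)).length : Int)
            = (i + 1) + ((t.takeWhile (· == y)).length : Int) := by
          simp only [List.length_cons]; push_cast; ring
        rw [e]
      · have hstep : aLoop n (y :: t) i cur start bds =
            aLoop n t (i + 1) y i
              (bds ++ [[("phase", cur), ("start", start), ("end", i - 1)]]) := by
          simp [aLoop, hy]
        rw [hstep, ih y i (i + 1) _ hlen]
        have hb : (y == cur) = false := by simpa using hy
        have htw : (y :: t).takeWhile (· == cur) = [] := by
          simp [List.takeWhile, hb]
        have hdw : (y :: t).dropWhile (· == cur) = y :: t := by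
          simp [List.dropWhile, hb]
        rw [htw, hdw, altgo_cons]
        have e1 : i + (([] : List Int).length : Int) - 1 = i - 1 := by simp
        have e2 : i + (([] : List Int).length : Int) = i := by simp
        have e3 : i + (1 + ((t.takeWhile (· == y)).length : Int))
            = (i + 1) + ((t.takeWhile (· == y)).length : Int) := by ring
        rw [e1, e2, e3]
        simp

-- ===== VERDICT (by name: the statement is the Claim_ definition above) =====
theorem find_phase_boundaries_py_spec : Claim_equal_find_phase_boundaries_py := by
  intro labels _
  unfold Spec_find_phase_boundaries_py find_phase_boundaries_py find_phase_boundaries_py_alt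
  cases labels with
  | nil => rw [altgo_nil]
  | cons l0 rest =>
      show aLoop (((l0 :: rest).length : Nat) : Int) (l0 :: rest) 0 l0 0 [] =
        find_phase_boundaries_py_alt_go (l0 :: rest) 0
      rw [key _ _ l0 0 0 [] (by simp), altgo_cons]
      have htw : (l0 :: rest).takeWhile (· == l0) = l0 :: rest.takeWhile (· == l0) := by
        simp [List.takeWhile]
      have hdw : (l0 :: rest).dropWhile (· == l0) = rest.dropWhile (· == l0) := by
        simp [List.dropWhile]
      rw [htw, hdw]
      have e : ((0 : Int) + ((l0 :: rest.takeWhile (· == l0)).length : Int))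
          = 0 + (1 + ((rest.takeWhile (· == l0)).length : Int)) := by
        simp only [List.length_cons]; push_cast; ring
      rw [show ((0 : Int) + ((l0 :: rest.takeWhile (· == l0)).length : Int) - 1)
          = 0 + (1 + ((rest.takeWhile (· == l0)).length : Int)) - 1 by rw [e], e]
      simp
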